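-- pv_equiv track=rewrite | github.com/dvivekananthanece/Hackerearth | EqualParitySum.py | content
-- ===== SOURCE A (Python) =====
-- def content(logicArray):
--     even = 0
--     odd = 0
--     index = 0
--     for item in range(1, len(logicArray) + 1):
--         if item % 2 == 0:
--             even += logicArray[index]
--             index = index + 1
--         else:
--             odd += logicArray[index]
--             index = index + 1
--     return odd, even
-- ===== SOURCE B (Python) =====
-- def content(logicArray):
--     # Single backward pass with a swap: no index variable, no parity branch.
--     odd = 0
--     even = 0
--     for x in reversed(logicArray):
--         odd, even = x + even, odd
--     return odd, even
-- ===== Notes on version B (the rewrite author's own statement) =====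
-- stated objective: simpler
-- what changed: Replaces the indexed loop with a per-iteration parity branch by a single branch-free backward pass that swaps the two accumulators at each element.
import Mathlib
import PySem

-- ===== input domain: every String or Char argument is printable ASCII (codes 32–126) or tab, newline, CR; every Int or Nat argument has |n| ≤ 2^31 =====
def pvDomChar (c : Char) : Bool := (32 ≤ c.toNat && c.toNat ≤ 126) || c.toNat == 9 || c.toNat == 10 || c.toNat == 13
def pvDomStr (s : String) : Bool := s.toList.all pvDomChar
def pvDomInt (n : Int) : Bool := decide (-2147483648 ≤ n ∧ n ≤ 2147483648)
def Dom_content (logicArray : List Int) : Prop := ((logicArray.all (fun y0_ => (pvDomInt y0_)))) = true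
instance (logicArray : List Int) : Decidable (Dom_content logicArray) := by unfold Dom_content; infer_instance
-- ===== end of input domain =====

-- B replaces A's indexed loop with parity branch by one branch-free backward pass swapping two accumulators (objective: simpler).


-- ===== PORT A =====
-- state (even, odd, index); loop 'for item in range(1, len+1)'; index is always in range, so pyGetD is exact
def content (logicArray : List Int) : Int × Int :=
  let st := (PySem.List.pyRange 1 ((logicArray.length : Int) + 1) 1).foldl
    (fun (s : Int × Int × Int) item =>
      if PySem.Int.mod item 2 == 0 then
        (s.1 + PySem.List.pyGetD logicArray s.2.2 0, s.2.1, s.2.2 + 1)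
      else
        (s.1, s.2.1 + PySem.List.pyGetD logicArray s.2.2 0, s.2.2 + 1))
    (0, 0, 0)
  (st.2.1, st.1)

-- ===== PORT B =====
-- 'for x in reversed(logicArray): odd, even = x + even, odd' is a right fold
def content_alt (logicArray : List Int) : Int × Int :=
  logicArray.foldr (fun x (p : Int × Int) => (x + p.2, p.1)) (0, 0)

-- ===== PRECONDITION & SPEC =====
def Spec_content (logicArray : List Int) (out : Int × Int) : Prop := out = content_alt logicArray
instance (logicArray : List Int) (out : Int × Int) : Decidable (Spec_content logicArray out) := by unfold Spec_content; infer_instance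

-- ===== CLAIM (what is proved, stated in full; the proofs are below) =====
def Claim_equal_content : Prop := ∀ (logicArray : List Int), Dom_content logicArray → Spec_content logicArray (content logicArray)

-- ===== LEMMAS AND PROOFS =====

lemma content_loop (g : List Int) :
    ∀ (m k : Nat) (e o : Int), k + m = g.length →
    (PySem.List.pyRange ((k : Int) + 1) ((k : Int) + 1 + (m : Int)) 1).foldl
      (fun (s : Int × Int × Int) item =>
        if PySem.Int.mod item 2 == 0 then
          (s.1 + PySem.List.pyGetD g s.2.2 0, s.2.1, s.2.2 + 1)
        else
          (s.1, s.2.1 + PySem.List.pyGetD g s.2.2 0, s.2.2 + 1))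
      (e, o, (k : Int)) =
    (if k % 2 = 0 then
      (e + (content_alt (g.drop k)).2, o + (content_alt (g.drop k)).1, (k : Int) + (m : Int))
     else
      (e + (content_alt (g.drop k)).1, o + (content_alt (g.drop k)).2, (k : Int) + (m : Int))) := by
  intro m
  induction m with
  | zero =>
    intro k e o hk
    rw [PySem.List.pyRange_one_eq_nil (by omega)]
    have hd : g.drop k = [] := List.drop_eq_nil_of_le (by omega)
    simp [hd, content_alt]
  | succ m ih =>
    intro k e o hk
    rw [show ((k : Int) + 1 + ((m + 1 : Nat) : Int)) = ((k + 1 : Nat) : Int) + 1 + (m : Int) by push_cast; ring]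
    rw [PySem.List.pyRange_one_cons (by push_cast; omega)]
    have hklt : k < g.length := by omega
    have hd : g.drop k = g[k] :: g.drop (k + 1) := List.drop_eq_getElem_cons hklt
    have hget : PySem.List.pyGetD g (k : Int) 0 = g[k] := by
      rw [PySem.List.pyGetD_natCast]; exact List.getD_eq_getElem g 0 hklt
    have hcast : (k : Int) + 1 = ((k + 1 : Nat) : Int) := by push_cast; ring
    have hmod : PySem.Int.mod (((k + 1 : Nat) : Int)) 2 = (((k + 1) % 2 : Nat) : Int) :=
      PySem.Int.mod_natCast (k + 1) 2
    rw [hcast]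
    simp only [List.foldl_cons, hget]
    rw [hmod]
    rcases Nat.even_or_odd k with hpar | hpar
    · have h2 : k % 2 = 0 := Nat.even_iff.mp hpar
      have h3 : (k + 1) % 2 = 1 := by omega
      rw [h3]
      have hcond : ((((1 : Nat) : Int)) == 0) = false := by decide
      rw [hcond]
      simp only [Bool.false_eq_true, if_false]
      rw [hcast]
      rw [ih (k + 1) e (o + g[k]) (by omega)]
      simp only [h3, h2, if_neg (by omega : ¬ (1 : Nat) = 0)]
      rw [hd]
      simp only [content_alt, List.foldr_cons]
      refine Prod.ext ?_ (Prod.ext ?_ ?_) <;> simp <;> omega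
    · have h2 : k % 2 = 1 := Nat.odd_iff.mp hpar
      have h3 : (k + 1) % 2 = 0 := by omega
      rw [h3]
      have hcond : ((((0 : Nat) : Int)) == 0) = true := by decide
      rw [hcond]
      simp only [if_true]
      rw [hcast]
      rw [ih (k + 1) (e + g[k]) o (by omega)]
      simp only [h3, h2, if_neg (by omega : ¬ (1 : Nat) = 0)]
      rw [hd]
      simp only [content_alt, List.foldr_cons]
      refine Prod.ext ?_ (Prod.ext ?_ ?_) <;> simp <;> omega

-- ===== VERDICT (by name: the statement is the Claim_ definition above) =====
theorem content_spec : Claim_equal_content := by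
  intro l _
  unfold Spec_content
  simp only [content]
  have h := content_loop l l.length 0 0 0 (by omega)
  simp only [Nat.cast_zero, zero_add, List.drop_zero, Nat.zero_mod] at h
  rw [show (1 + (l.length : Int)) = (l.length : Int) + 1 by ring] at h
  rw [h]
  simp
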